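-- pv_equiv track=rewrite | github.com/karloversic/apartments-price-scraper | main.py | parse
-- ===== SOURCE A (Python) =====
-- def parse(list_unparsed):
--     max_len = -1
--     list_parsed = []
--     for items in list_unparsed:
--         for item in items:
--             list_parsed.append(item)
--
--             # Get max item length to know prices.txt table dimensions
--             if len(item) > max_len:
--                 max_len = len(item)
--     return list_parsed, max_len
-- ===== SOURCE B (Python) =====
-- def parse(list_unparsed):
--     flat = [item for items in list_unparsed for item in items]
--     by_len = sorted(flat, key=len, reverse=True)
--     max_len = len(by_len[0]) if by_len else -1
--     return flat, max_len
-- ===== Notes on version B (the rewrite author's own statement) =====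
-- stated objective: alternative
-- what changed: Flattens with a comprehension and then finds the maximum length by a stable reverse sort on length and taking the head of the sorted list (sort-then-pick instead of a running maximum interleaved with the append loop); trades the O(n) running max for an O(n log n) sort.
import Mathlib
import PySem

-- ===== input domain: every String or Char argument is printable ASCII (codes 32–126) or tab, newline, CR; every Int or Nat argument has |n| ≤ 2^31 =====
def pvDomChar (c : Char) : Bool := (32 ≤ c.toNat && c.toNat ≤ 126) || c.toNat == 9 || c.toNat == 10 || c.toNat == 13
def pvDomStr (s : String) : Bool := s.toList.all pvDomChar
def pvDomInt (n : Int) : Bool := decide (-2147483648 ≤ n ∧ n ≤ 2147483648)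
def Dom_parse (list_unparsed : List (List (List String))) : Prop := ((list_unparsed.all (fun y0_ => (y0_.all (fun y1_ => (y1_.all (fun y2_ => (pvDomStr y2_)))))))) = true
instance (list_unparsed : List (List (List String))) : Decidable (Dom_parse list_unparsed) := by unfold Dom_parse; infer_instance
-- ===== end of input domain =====

-- ===== PORT A =====
-- A: one interleaved nested loop building the flattened list and the running max together.
def parse (list_unparsed : List (List (List String))) : List (List String) × Int :=
  list_unparsed.foldl (fun st items =>
    items.foldl (fun st item =>
      (st.1 ++ [item], if (item.length : Int) > st.2 then (item.length : Int) else st.2)) st)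
    ([], -1)

-- ===== PORT B =====
-- B (alternative): flatten by comprehension, then stable reverse sort on length and take the head.
def parse_alt (list_unparsed : List (List (List String))) : List (List String) × Int :=
  let flat := list_unparsed.flatMap (fun items => items)
  let by_len := PySem.List.sorted flat (fun item => (item.length : Int)) true
  let max_len : Int :=
    match by_len with
    | [] => -1
    | x :: _ => (x.length : Int)
  (flat, max_len)

-- ===== PRECONDITION & SPEC =====
def Spec_parse (list_unparsed : List (List (List String))) (out : List (List String) × Int) : Prop := out = parse_alt list_unparsed
instance (list_unparsed : List (List (List String))) (out : List (List String) × Int) : Decidable (Spec_parse list_unparsed out) := by unfold Spec_parse; infer_instance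

-- ===== CLAIM =====
def Claim_equal_parse : Prop := ∀ (list_unparsed : List (List (List String))), Dom_parse list_unparsed → Spec_parse list_unparsed (parse list_unparsed)

-- ===== LEMMAS AND PROOFS =====

-- the inner (per-`items`) loop of A, characterised
theorem parse_inner (items : List (List String)) (acc : List (List String)) (m : Int) :
    items.foldl (fun st item =>
      (st.1 ++ [item], if (item.length : Int) > st.2 then (item.length : Int) else st.2)) (acc, m)
    = (acc ++ items, items.foldl (fun s item => max s (item.length : Int)) m) := by
  induction items generalizing acc m with
  | nil => simp
  | cons x t ih =>
      simp only [List.foldl_cons, ih, Prod.mk.injEq]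
      refine ⟨by simp, ?_⟩
      congr 1
      omega

-- the outer loop of A, characterised as a fold over the flattened list
theorem parse_outer (lu : List (List (List String))) (acc : List (List String)) (m : Int) :
    lu.foldl (fun st items =>
      items.foldl (fun st item =>
        (st.1 ++ [item], if (item.length : Int) > st.2 then (item.length : Int) else st.2)) st)
      (acc, m)
    = (acc ++ lu.flatMap (fun items => items),
       (lu.flatMap (fun items => items)).foldl (fun s item => max s (item.length : Int)) m) := by
  induction lu generalizing acc m with
  | nil => simp
  | cons xs t ih =>
      simp only [List.foldl_cons, parse_inner, ih, List.flatMap_cons]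
      simp [List.foldl_append, List.append_assoc]

-- a running max over elements all bounded by the accumulator stays at the accumulator
theorem foldl_max_const (t : List (List String)) (c : Int)
    (h : ∀ y ∈ t, (y.length : Int) ≤ c) :
    t.foldl (fun s item => max s (item.length : Int)) c = c := by
  induction t generalizing c with
  | nil => rfl
  | cons y r ih =>
      simp only [List.foldl_cons]
      have hy : (y.length : Int) ≤ c := h y (by simp)
      rw [max_eq_left hy]
      exact ih c (fun z hz => h z (by simp [hz]))

-- a running max over a list containing a greatest element equals that element's value
theorem foldl_max_attained (L : List (List String)) (c : Int) (x : List String)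
    (hx : x ∈ L) (hmax : ∀ y ∈ L, (y.length : Int) ≤ (x.length : Int))
    (hc : c ≤ (x.length : Int)) :
    L.foldl (fun s item => max s (item.length : Int)) c = (x.length : Int) := by
  induction L generalizing c with
  | nil => cases hx
  | cons y t ih =>
      simp only [List.foldl_cons]
      by_cases hxy : (x.length : Int) = (y.length : Int)
      · rw [← hxy, max_eq_right hc]
        exact foldl_max_const t _ (fun z hz => hmax z (List.mem_cons_of_mem _ hz))
      · have hxt : x ∈ t := by
          rcases List.mem_cons.mp hx with h | h
          · exact absurd (by rw [h]) hxy
          · exact h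
        refine ih _ hxt (fun z hz => hmax z (List.mem_cons_of_mem _ hz)) ?_
        have : (y.length : Int) ≤ (x.length : Int) := hmax y (by simp)
        omega

-- ===== VERDICT =====
theorem parse_spec : Claim_equal_parse := by
  intro lu _
  unfold Spec_parse parse parse_alt
  rw [parse_outer]
  simp only [List.nil_append]
  refine Prod.ext rfl ?_
  cases h : PySem.List.sorted (lu.flatMap (fun items => items)) (fun item => (item.length : Int)) true with
  | nil =>
      have hnil : lu.flatMap (fun items => items) = [] :=
        (PySem.List.sorted_eq_nil_iff _ _ _).mp h
      simp [hnil]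
  | cons x t =>
      have hmem : x ∈ lu.flatMap (fun items => items) := by
        have := PySem.List.sorted_perm (lu.flatMap (fun items => items))
          (fun item => (item.length : Int)) true
        rw [h] at this
        exact this.mem_iff.mp (by simp)
      have hmax : ∀ y ∈ lu.flatMap (fun items => items),
          (y.length : Int) ≤ (x.length : Int) :=
        PySem.List.key_head_sorted_rev_ge _ _ h
      exact foldl_max_attained _ _ x hmem hmax (by have := Int.natCast_nonneg x.length; omega)
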